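-- pv_equiv track=rewrite | github.com/eugenekoh/Credit-Suisse-CodeIT-2020 | codeitsuisse/routes/social_distance.py | find_social_distance
-- ===== SOURCE A (Python) =====
-- def find_social_distance(pax, seats, dist):
-- 	dp = [[0]*(seats+1) for i in range(pax+1)]
-- 	for i in range(pax+1):
-- 		for j in range(seats+1):
-- 			if i == 0:
-- 				dp[i][j] = 0
-- 			elif i == 1:
-- 				dp[i][j] = j
-- 			else:
-- 				if j < (i-1)*dist + i:
-- 					dp[i][j] = 0
-- 				else:
-- 					dp[i][j] = dp[i-1][j-dist-1] + dp[i][j-1]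
-- 	return dp[-1][-1]
-- ===== SOURCE B (Python) =====
-- def find_social_distance(pax, seats, dist):
-- 	if pax == 0:
-- 		return 0
-- 	m = seats - (pax - 1) * dist
-- 	if m < pax:
-- 		return 0
-- 	c = 1
-- 	for k in range(1, pax + 1):
-- 		c = c * (m - pax + k) // k
-- 	return c
-- ===== Notes on version B (the rewrite author's own statement) =====
-- stated objective: faster
-- what changed: Replaces the O(pax*seats) dynamic-programming table with the closed-form binomial C(seats-(pax-1)*dist, pax), computed by a single O(pax) product loop; pax=0 still yields 0 as in A.
import Mathlib
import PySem

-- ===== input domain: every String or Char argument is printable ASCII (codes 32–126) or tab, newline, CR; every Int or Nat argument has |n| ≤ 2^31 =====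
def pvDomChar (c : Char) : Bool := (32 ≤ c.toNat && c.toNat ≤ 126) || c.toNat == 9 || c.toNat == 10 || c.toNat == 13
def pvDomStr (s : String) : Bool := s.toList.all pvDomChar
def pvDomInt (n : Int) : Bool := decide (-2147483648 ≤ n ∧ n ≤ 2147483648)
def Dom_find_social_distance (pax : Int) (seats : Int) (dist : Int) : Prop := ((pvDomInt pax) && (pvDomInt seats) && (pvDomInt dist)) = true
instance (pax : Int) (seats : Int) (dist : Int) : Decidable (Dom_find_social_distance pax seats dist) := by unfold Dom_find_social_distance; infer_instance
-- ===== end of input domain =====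

-- B replaces A's O(pax*seats) DP table by the closed-form binomial C(seats-(pax-1)*dist, pax)
-- computed with one O(pax) product loop (pax=0 still yields 0, as in A).

-- ===== PORT A =====
def find_social_distance (pax : Int) (seats : Int) (dist : Int) : Int :=
  -- dp = [[0]*(seats+1) for i in range(pax+1)]
  let dp0 : List (List Int) :=
    (PySem.List.pyRange 0 (pax + 1) 1).map (fun _ => PySem.List.pyRepeat [(0 : Int)] (seats + 1))
  -- the two nested for-loops, mutating dp[i][j]
  let dp := (PySem.List.pyRange 0 (pax + 1) 1).foldl (fun dp i =>
      (PySem.List.pyRange 0 (seats + 1) 1).foldl (fun dp j =>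
        let v : Int :=
          if i = 0 then 0
          else if i = 1 then j
          else if j < (i - 1) * dist + i then 0
          else PySem.List.pyGetD (PySem.List.pyGetD dp (i - 1) []) (j - dist - 1) 0 +
               PySem.List.pyGetD (PySem.List.pyGetD dp i []) (j - 1) 0
        PySem.List.pySetD dp i (PySem.List.pySetD (PySem.List.pyGetD dp i []) j v)) dp) dp0
  -- return dp[-1][-1]
  PySem.List.pyGetD (PySem.List.pyGetD dp (-1) []) (-1) 0

-- ===== PORT B =====
def find_social_distance_alt (pax : Int) (seats : Int) (dist : Int) : Int :=
  if pax = 0 then 0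
  else
    let m := seats - (pax - 1) * dist
    if m < pax then 0
    else (PySem.List.pyRange 1 (pax + 1) 1).foldl
      (fun c k => PySem.Int.floordiv (c * (m - pax + k)) k) 1

-- ===== PRECONDITION & SPEC =====
-- Pre_ excludes exactly the inputs on which A raises IndexError: pax < 0 or seats < 0
-- (dp or its rows are empty, so dp[-1][-1] fails) and dist ≤ -2 with pax ≥ 2
-- (the read dp[i-1][j-dist-1] runs past the end of the row at j = seats).
def Pre_find_social_distance (pax : Int) (seats : Int) (dist : Int) : Prop :=
  0 ≤ pax ∧ 0 ≤ seats ∧ (-1 ≤ dist ∨ pax ≤ 1)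
instance (pax : Int) (seats : Int) (dist : Int) : Decidable (Pre_find_social_distance pax seats dist) := by unfold Pre_find_social_distance; infer_instance

def pvWitness_find_social_distance : Int × Int × Int := (2, 4, 1)

def Spec_find_social_distance (pax : Int) (seats : Int) (dist : Int) (out : Int) : Prop := out = find_social_distance_alt pax seats dist
instance (pax : Int) (seats : Int) (dist : Int) (out : Int) : Decidable (Spec_find_social_distance pax seats dist out) := by unfold Spec_find_social_distance; infer_instance

-- ===== CLAIM (what is proved, stated in full; the proofs are below) =====
def Claim_equal_find_social_distance : Prop := ∀ (pax : Int) (seats : Int) (dist : Int), Dom_find_social_distance pax seats dist → Pre_find_social_distance pax seats dist → Spec_find_social_distance pax seats dist (find_social_distance pax seats dist)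

-- ===== LEMMAS AND PROOFS =====

-- the closed form: C(m, i) as an Int, 0 below the diagonal
def pvCz (m i : Int) : Int := if m < i then 0 else (m.toNat.choose i.toNat : Int)
-- the value A's table holds at dp[i][j]
def pvV (dist i j : Int) : Int := if i = 0 then 0 else pvCz (j - (i - 1) * dist) i
-- a finished row, a row filled up to column c, an all-zero row
def pvRow (dist : Int) (S : Nat) (i : Int) : List Int :=
  (List.range S).map (fun (j : Nat) => pvV dist i (j : Int))
def pvPartial (dist : Int) (S : Nat) (i c : Int) : List Int :=
  (List.range S).map (fun (j : Nat) => if (j : Int) < c then pvV dist i (j : Int) else 0)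
def pvZ (S : Nat) : List Int := (List.range S).map (fun (_ : Nat) => (0 : Int))
-- the whole table while row i is being filled up to column c
def pvDP (dist : Int) (P S : Nat) (i c : Int) : List (List Int) :=
  (List.range P).map (fun (r : Nat) =>
    if (r : Int) < i then pvRow dist S r
    else if (r : Int) = i then pvPartial dist S i c
    else pvZ S)

lemma pvGet {α : Type} (f : Nat → α) (n : Nat) (j : Int) (d : α)
    (h0 : 0 ≤ j) (hn : j < (n : Int)) :
    PySem.List.pyGetD ((List.range n).map f) j d = f j.toNat := by
  rw [PySem.List.pyGetD_eq_getElem _ d h0 (by simpa using hn)]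
  simp [List.getElem_map]

lemma pvSet {α : Type} (f : Nat → α) (n : Nat) (j : Int) (v : α)
    (h0 : 0 ≤ j) (hn : j < (n : Int)) :
    PySem.List.pySetD ((List.range n).map f) j v
      = (List.range n).map (fun (k : Nat) => if (k : Int) = j then v else f k) := by
  rw [PySem.List.pySetD_of_nonneg _ v h0]
  apply List.ext_getElem
  · simp
  · intro k hk hk'
    simp only [List.getElem_set, List.getElem_map, List.getElem_range]
    by_cases h : k = j.toNat
    · simp [h, Int.toNat_of_nonneg h0]
    · have h1 : ¬ ((k : Int) = j) := by omega
      have h2 : ¬ j.toNat = k := by omega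
      simp [h1, h2]

lemma pvPartial_zero (dist : Int) (S : Nat) (i : Int) : pvPartial dist S i 0 = pvZ S := by
  unfold pvPartial pvZ
  apply List.map_congr_left
  intro j _
  simp

lemma pvPartial_full (dist : Int) (seats : Int) (hs : 0 ≤ seats) (i : Int) :
    pvPartial dist ((seats + 1).toNat) i (seats + 1) = pvRow dist ((seats + 1).toNat) i := by
  unfold pvPartial pvRow
  apply List.map_congr_left
  intro j hj
  simp only [List.mem_range] at hj
  have : (j : Int) < seats + 1 := by omega
  simp [this]

lemma pvCz_pascal (dist n i : Int) (h2 : 2 ≤ i) (hn : i ≤ n) :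
    pvCz n i = pvCz (n - 1) (i - 1) + pvCz (n - 1) i := by
  unfold pvCz
  by_cases h : n = i
  · subst h
    have h1 : ¬ (n < n) := by omega
    have h2' : ¬ (n - 1 < n - 1) := by omega
    have h3 : n - 1 < n := by omega
    simp only [h1, h2', h3, if_false, if_true, if_neg, if_pos]
    have : (n - 1).toNat = n.toNat - 1 := by omega
    simp [this, Nat.choose_self]
  · have hlt : i < n := lt_of_le_of_ne hn (fun h' => h h'.symm)
    have ha : ¬ (n < i) := by omega
    have hb : ¬ (n - 1 < i - 1) := by omega
    have hc : ¬ (n - 1 < i) := by omega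
    simp only [ha, hb, hc, if_false]
    have hn1 : n.toNat = (n - 1).toNat + 1 := by omega
    have hi1 : i.toNat = (i - 1).toNat + 1 := by omega
    rw [hn1, hi1, Nat.choose_succ_succ]
    push_cast
    ring

lemma pvV_one (dist c : Int) (hc : 0 ≤ c) : pvV dist 1 c = c := by
  unfold pvV pvCz
  simp only [if_neg (by omega : ¬ (1:Int) = 0)]
  by_cases h : c - (1 - 1) * dist < 1
  · have : c = 0 := by nlinarith
    simp [this]
  · have h0 : c - (1 - 1) * dist = c := by ring
    rw [h0] at h ⊢
    rw [if_neg h]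
    have : (1 : Int).toNat = 1 := rfl
    rw [this, Nat.choose_one_right]
    omega

lemma pvV_ne (dist i j : Int) (h : ¬ i = 0) : pvV dist i j = pvCz (j - (i - 1) * dist) i := by
  unfold pvV; rw [if_neg h]

-- one assignment dp[i][c] = v advances the partial row by one column
lemma pvStep (pax seats dist : Int) (hs : 0 ≤ seats)
    (i : Int) (hi0 : 0 ≤ i) (hip : i ≤ pax) (hd : 2 ≤ i → -1 ≤ dist)
    (c : Int) (hc0 : 0 ≤ c) (hcs : c ≤ seats) :
    PySem.List.pySetD (pvDP dist ((pax + 1).toNat) ((seats + 1).toNat) i c) i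
      (PySem.List.pySetD
        (PySem.List.pyGetD (pvDP dist ((pax + 1).toNat) ((seats + 1).toNat) i c) i []) c
        (if i = 0 then 0
         else if i = 1 then c
         else if c < (i - 1) * dist + i then 0
         else PySem.List.pyGetD (PySem.List.pyGetD (pvDP dist ((pax + 1).toNat) ((seats + 1).toNat) i c) (i - 1) []) (c - dist - 1) 0 +
              PySem.List.pyGetD (PySem.List.pyGetD (pvDP dist ((pax + 1).toNat) ((seats + 1).toNat) i c) i []) (c - 1) 0))
    = pvDP dist ((pax + 1).toNat) ((seats + 1).toNat) i (c + 1) := by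
  have hp : 0 ≤ pax := le_trans hi0 hip
  set P := (pax + 1).toNat with hP
  set S := (seats + 1).toNat with hS
  have hPi : (P : Int) = pax + 1 := by omega
  have hSi : (S : Int) = seats + 1 := by omega
  have hiP : i < (P : Int) := by omega
  have hcS : c < (S : Int) := by omega
  -- the current row
  have hrow : PySem.List.pyGetD (pvDP dist P S i c) i [] = pvPartial dist S i c := by
    rw [pvDP, pvGet _ _ _ _ hi0 hiP]
    have h' : ((i.toNat : Int)) = i := Int.toNat_of_nonneg hi0
    rw [h']
    simp
  -- the computed value is pvV dist i c
  have hv : (if i = 0 then 0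
          else if i = 1 then c
          else if c < (i - 1) * dist + i then 0
          else PySem.List.pyGetD (PySem.List.pyGetD (pvDP dist P S i c) (i - 1) []) (c - dist - 1) 0 +
               PySem.List.pyGetD (PySem.List.pyGetD (pvDP dist P S i c) i []) (c - 1) 0)
        = pvV dist i c := by
    by_cases h0 : i = 0
    · simp [h0, pvV]
    · by_cases h1 : i = 1
      · simp [h0, h1, pvV_one dist c hc0]
      · have h2 : 2 ≤ i := by omega
        have hdist : -1 ≤ dist := hd h2
        rw [if_neg h0, if_neg h1]
        by_cases hb : c < (i - 1) * dist + i
        · rw [if_pos hb]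
          unfold pvV pvCz
          rw [if_neg h0, if_pos (by linarith)]
        · rw [if_neg hb]
          push_neg at hb
          -- bounds for the two reads
          have hmul : (i - 1) * dist = dist + (i - 2) * dist := by ring
          have hx0 : 0 ≤ c - dist - 1 := by
            rcases (by omega : dist = -1 ∨ 0 ≤ dist) with h | h
            · omega
            · have := mul_nonneg (by omega : (0:Int) ≤ i - 2) h
              linarith
          have hc1 : 1 ≤ c := by
            have := mul_le_mul_of_nonneg_left hdist (by omega : (0:Int) ≤ i - 1)
            linarith
          have hxS : c - dist - 1 < (S : Int) := by omega
          -- first read: finished row i-1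
          have hprev : PySem.List.pyGetD (pvDP dist P S i c) (i - 1) [] = pvRow dist S (i - 1) := by
            rw [pvDP, pvGet _ _ _ _ (by omega) (by omega)]
            rw [show (((i - 1).toNat : Nat) : Int) = i - 1 from by omega]
            simp [(by omega : i - 1 < i)]
          rw [hprev, hrow]
          rw [pvRow, pvGet _ _ _ _ hx0 hxS]
          rw [pvPartial, pvGet _ _ _ _ (by omega) (by omega)]
          have e1 : (((c - dist - 1).toNat : Int)) = c - dist - 1 := by omega
          have e2 : (((c - 1).toNat : Int)) = c - 1 := by omega
          rw [e1, e2, if_pos (by omega : c - 1 < c)]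
          -- Pascal's identity on the closed form
          rw [pvV_ne dist (i - 1) (c - dist - 1) (by omega),
              pvV_ne dist i (c - 1) h0, pvV_ne dist i c h0]
          have hn : i ≤ c - (i - 1) * dist := by linarith
          have hpas := pvCz_pascal dist (c - (i - 1) * dist) i (by omega) hn
          have ea : c - dist - 1 - (i - 1 - 1) * dist = c - (i - 1) * dist - 1 := by ring
          have eb : c - 1 - (i - 1) * dist = c - (i - 1) * dist - 1 := by ring
          rw [ea, eb]
          linarith [hpas]
  rw [hv, hrow]
  -- writing pvV dist i c at column c extends the partial row
  have hsetrow : PySem.List.pySetD (pvPartial dist S i c) c (pvV dist i c)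
      = pvPartial dist S i (c + 1) := by
    rw [pvPartial, pvSet _ _ _ _ hc0 hcS]
    unfold pvPartial
    apply List.map_congr_left
    intro k hk
    by_cases h : (k : Int) = c
    · simp [h, (by omega : c < c + 1)]
    · by_cases h' : (k : Int) < c
      · simp [h, h', (by omega : (k:Int) < c + 1)]
      · have h1 : ¬ (k : Int) < c + 1 := by omega
        have h2 : ¬ (k : Int) ≤ c := by omega
        simp [h, h', h1, h2]
  rw [hsetrow]
  -- writing the row back into the table
  rw [pvDP, pvSet _ _ _ _ hi0 hiP]
  unfold pvDP
  apply List.map_congr_left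
  intro r hr
  by_cases h : (r : Int) = i
  · simp [h]
  · by_cases h' : (r : Int) < i
    · simp [h, h']
    · simp [h, h']

-- the inner for-loop fills row i completely
lemma pvInner (pax seats dist : Int) (hs : 0 ≤ seats)
    (i : Int) (hi0 : 0 ≤ i) (hip : i ≤ pax) (hd : 2 ≤ i → -1 ≤ dist) :
    ∀ c : Int, 0 ≤ c → c ≤ seats + 1 →
    (PySem.List.pyRange 0 c 1).foldl (fun dp j =>
        let v : Int :=
          if i = 0 then 0
          else if i = 1 then j
          else if j < (i - 1) * dist + i then 0
          else PySem.List.pyGetD (PySem.List.pyGetD dp (i - 1) []) (j - dist - 1) 0 +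
               PySem.List.pyGetD (PySem.List.pyGetD dp i []) (j - 1) 0
        PySem.List.pySetD dp i (PySem.List.pySetD (PySem.List.pyGetD dp i []) j v))
      (pvDP dist ((pax + 1).toNat) ((seats + 1).toNat) i 0)
    = pvDP dist ((pax + 1).toNat) ((seats + 1).toNat) i c := by
  intro c hc0
  induction c, hc0 using Int.le_induction with
  | base =>
    intro _
    rw [PySem.List.pyRange_one_eq_nil (by omega : (0:Int) ≤ 0)]
    simp [List.foldl_nil]
  | succ c hc ih =>
    intro hcs
    rw [PySem.List.pyRange_one_succ_right (by omega : (0:Int) ≤ c), List.foldl_append]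
    rw [ih (by omega)]
    simp only [List.foldl_cons, List.foldl_nil]
    exact pvStep pax seats dist hs i hi0 hip hd c hc (by omega)

lemma pvDP_roll (pax seats dist : Int) (hs : 0 ≤ seats) (i : Int) :
    pvDP dist ((pax + 1).toNat) ((seats + 1).toNat) i (seats + 1)
      = pvDP dist ((pax + 1).toNat) ((seats + 1).toNat) (i + 1) 0 := by
  unfold pvDP
  apply List.map_congr_left
  intro r hr
  by_cases h1 : (r : Int) < i
  · simp [h1, (by omega : (r:Int) < i + 1)]
  · by_cases h2 : (r : Int) = i
    · simp [h2, (by omega : ¬ i < i), pvPartial_full dist seats hs, (by omega : i < i + 1)]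
    · have h3 : ¬ (r : Int) < i + 1 := by omega
      by_cases h4 : (r : Int) = i + 1
      · simp [h1, h2, h3, h4, pvPartial_zero]
      · simp [h1, h2, h3, h4]

-- the outer for-loop fills the first b rows
lemma pvOuter (pax seats dist : Int) (hp : 0 ≤ pax) (hs : 0 ≤ seats)
    (hd : 2 ≤ pax → -1 ≤ dist) :
    ∀ b : Int, 0 ≤ b → b ≤ pax + 1 →
    (PySem.List.pyRange 0 b 1).foldl (fun dp i =>
      (PySem.List.pyRange 0 (seats + 1) 1).foldl (fun dp j =>
        let v : Int :=
          if i = 0 then 0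
          else if i = 1 then j
          else if j < (i - 1) * dist + i then 0
          else PySem.List.pyGetD (PySem.List.pyGetD dp (i - 1) []) (j - dist - 1) 0 +
               PySem.List.pyGetD (PySem.List.pyGetD dp i []) (j - 1) 0
        PySem.List.pySetD dp i (PySem.List.pySetD (PySem.List.pyGetD dp i []) j v)) dp)
      (pvDP dist ((pax + 1).toNat) ((seats + 1).toNat) 0 0)
    = pvDP dist ((pax + 1).toNat) ((seats + 1).toNat) b 0 := by
  intro b hb0
  induction b, hb0 using Int.le_induction with
  | base => intro _; rw [PySem.List.pyRange_one_eq_nil (by omega : (0:Int) ≤ 0)]; simp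
  | succ b hb ih =>
    intro hbs
    rw [PySem.List.pyRange_one_succ_right (by omega : (0:Int) ≤ b), List.foldl_append]
    rw [ih (by omega)]
    simp only [List.foldl_cons, List.foldl_nil]
    have hdb : 2 ≤ b → -1 ≤ dist := by intro h; exact hd (by omega)
    rw [pvInner pax seats dist hs b hb (by omega) hdb (seats + 1) (by omega) (by omega)]
    exact pvDP_roll pax seats dist hs b

-- the initial table equals pvDP 0 0
lemma pvInit (pax seats dist : Int) (hp : 0 ≤ pax) :
    (PySem.List.pyRange 0 (pax + 1) 1).map (fun _ => PySem.List.pyRepeat [(0 : Int)] (seats + 1))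
      = pvDP dist ((pax + 1).toNat) ((seats + 1).toNat) 0 0 := by
  unfold pvDP
  rw [PySem.List.pyRange_one]
  rw [List.map_map]
  simp only [Int.sub_zero]
  apply List.map_congr_left
  intro r hr
  simp only [Function.comp]
  rw [PySem.List.pyRepeat_singleton]
  have hz : pvZ ((seats + 1).toNat) = List.replicate ((seats + 1).toNat) (0 : Int) := by
    unfold pvZ
    rw [List.map_const', List.length_range]
  by_cases h : (r : Int) = 0
  · simp [h, pvPartial_zero, hz]
  · have h' : ¬ r = 0 := by omega
    simp [h, h', (by omega : ¬ (r : Int) < 0), hz]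

-- B's product loop computes the binomial coefficient
lemma pvProd (m pax dist : Int) (hmp : pax ≤ m) (hp1 : 1 ≤ pax) :
    ∀ t : Int, 0 ≤ t → t ≤ pax →
    (PySem.List.pyRange 1 (t + 1) 1).foldl
      (fun c k => PySem.Int.floordiv (c * (m - pax + k)) k) 1
    = ((m - pax + t).toNat.choose t.toNat : Int) := by
  intro t ht0
  induction t, ht0 using Int.le_induction with
  | base =>
    intro _
    rw [show (0:Int) + 1 = 1 from by norm_num]
    rw [PySem.List.pyRange_one_eq_nil (by omega : (1:Int) ≤ 1)]
    simp
  | succ t ht ih =>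
    intro hts
    rw [PySem.List.pyRange_one_succ_right (by omega : (1:Int) ≤ t + 1), List.foldl_append]
    rw [ih (by omega)]
    simp only [List.foldl_cons, List.foldl_nil]
    set a := (m - pax + t).toNat with ha
    set k := t.toNat with hk
    have e1 : m - pax + t + 1 = ((a + 1 : Nat) : Int) := by omega
    have e2 : t + 1 = ((k + 1 : Nat) : Int) := by omega
    have e3 : (m - pax + (t + 1)).toNat = a + 1 := by omega
    have e4 : (t + 1).toNat = k + 1 := by omega
    rw [e3, e4]
    have key : (a.choose k) * (a + 1) = ((a + 1).choose (k + 1)) * (k + 1) := by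
      have h := Nat.succ_mul_choose_eq a k
      simpa [Nat.succ_eq_add_one, Nat.mul_comm] using h
    calc PySem.Int.floordiv ((a.choose k : Int) * (m - pax + (t + 1))) (t + 1)
        = PySem.Int.floordiv (((a.choose k * (a + 1) : Nat) : Int)) (((k + 1 : Nat) : Int)) := by
          congr 1
          rw [show m - pax + (t + 1) = ((a + 1 : Nat) : Int) from by omega]
          push_cast
          ring
      _ = (((a.choose k * (a + 1)) / (k + 1) : Nat) : Int) := PySem.Int.floordiv_natCast _ _
      _ = (((a + 1).choose (k + 1) : Nat) : Int) := by
          rw [key, Nat.mul_div_cancel _ (by omega : 0 < k + 1)]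

-- B equals the closed form pvV
lemma pvAlt (pax seats dist : Int) (hp : 0 ≤ pax) :
    find_social_distance_alt pax seats dist = pvV dist pax seats := by
  unfold find_social_distance_alt pvV
  by_cases h0 : pax = 0
  · simp [h0]
  · rw [if_neg h0, if_neg h0]
    simp only []
    by_cases h1 : seats - (pax - 1) * dist < pax
    · rw [if_pos h1]
      unfold pvCz
      rw [if_pos h1]
    · rw [if_neg h1]
      push_neg at h1
      rw [pvProd (seats - (pax - 1) * dist) pax dist h1 (by omega) pax hp le_rfl]
      unfold pvCz
      rw [if_neg (by omega)]
      congr 2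
      omega

-- ===== VERDICT (by name: the statement is the Claim_ definition above) =====
theorem find_social_distance_spec : Claim_equal_find_social_distance := by
  intro pax seats dist _ hpre
  obtain ⟨hp, hs, hd⟩ := hpre
  unfold Spec_find_social_distance
  have hd' : 2 ≤ pax → -1 ≤ dist := by
    intro h
    rcases hd with h1 | h1
    · exact h1
    · omega
  rw [show find_social_distance pax seats dist
        = PySem.List.pyGetD (PySem.List.pyGetD
            ((PySem.List.pyRange 0 (pax + 1) 1).foldl (fun dp i =>
              (PySem.List.pyRange 0 (seats + 1) 1).foldl (fun dp j =>
                let v : Int :=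
                  if i = 0 then 0
                  else if i = 1 then j
                  else if j < (i - 1) * dist + i then 0
                  else PySem.List.pyGetD (PySem.List.pyGetD dp (i - 1) []) (j - dist - 1) 0 +
                       PySem.List.pyGetD (PySem.List.pyGetD dp i []) (j - 1) 0
                PySem.List.pySetD dp i (PySem.List.pySetD (PySem.List.pyGetD dp i []) j v)) dp)
              ((PySem.List.pyRange 0 (pax + 1) 1).map (fun _ => PySem.List.pyRepeat [(0 : Int)] (seats + 1))))
            (-1) []) (-1) 0 from rfl]
  rw [pvInit pax seats dist hp]
  rw [pvOuter pax seats dist hp hs hd' (pax + 1) (by omega) le_rfl]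
  set P := (pax + 1).toNat with hP
  set S := (seats + 1).toNat with hS
  have hPpos : 1 ≤ (P : Int) := by omega
  have hSpos : 1 ≤ (S : Int) := by omega
  -- dp[-1]
  have hlen : (pvDP dist P S (pax + 1) 0).length = P := by
    unfold pvDP; simp
  rw [PySem.List.pyGetD_neg_ofNat _ 1 _ (by omega) (by omega : 1 ≤ (pvDP dist P S (pax+1) 0).length)]
  simp only [hlen]
  unfold pvDP
  rw [List.getElem_map, List.getElem_range]
  have hP1 : ((P - 1 : Nat) : Int) = pax := by omega
  rw [hP1, if_pos (by omega : pax < pax + 1)]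
  -- dp[-1][-1]
  have hlen2 : (pvRow dist S pax).length = S := by unfold pvRow; simp
  rw [PySem.List.pyGetD_neg_ofNat _ 1 _ (by omega) (by omega : 1 ≤ (pvRow dist S pax).length)]
  simp only [hlen2]
  unfold pvRow
  rw [List.getElem_map, List.getElem_range]
  have hS1 : ((S - 1 : Nat) : Int) = seats := by omega
  rw [hS1]
  exact (pvAlt pax seats dist hp).symm
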